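-- pv_equiv track=rewrite | github.com/idynkydnk/stats | stat_functions.py | calculate_current_streak
-- ===== SOURCE A (Python) =====
-- def is_player_winner(game, player_name, game_type):
-- 	"""Check if player won the doubles game"""
-- 	return player_name == game[2] or player_name == game[3]
--
-- def calculate_current_streak(games, player_name):
-- 	"""Calculate current win/loss streak"""
-- 	if not games:
-- 		return "No games"
--
-- 	current_type = None
-- 	streak_length = 0
--
-- 	for game, game_type in games:
-- 		is_winner = is_player_winner(game, player_name, game_type)
-- 		result_type = 'Win' if is_winner else 'Loss'
--
-- 		if current_type is None:
-- 			current_type = result_type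
-- 			streak_length = 1
-- 		elif current_type == result_type:
-- 			streak_length += 1
-- 		else:
-- 			break
--
-- 	return f"{streak_length} {current_type}{'s' if streak_length != 1 else ''}"
-- ===== SOURCE B (Python) =====
-- def calculate_current_streak(games, player_name):
--     """Calculate current win/loss streak"""
--     if not games:
--         return "No games"
--     results = ['Win' if player_name in game[2:4] else 'Loss' for game, game_type in games]
--     first = results[0]
--     streak_length = next((i for i, r in enumerate(results) if r != first), len(results))
--     return f"{streak_length} {first}{'s' if streak_length != 1 else ''}"
-- ===== Notes on version B (the rewrite author's own statement) =====
-- stated objective: idiomatic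
-- what changed: Replaces the stateful loop (current_type/streak_length accumulators with break) by a map into per-game results followed by a first-index-of-change search (find-first-differing index with len fallback).
import Mathlib
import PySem

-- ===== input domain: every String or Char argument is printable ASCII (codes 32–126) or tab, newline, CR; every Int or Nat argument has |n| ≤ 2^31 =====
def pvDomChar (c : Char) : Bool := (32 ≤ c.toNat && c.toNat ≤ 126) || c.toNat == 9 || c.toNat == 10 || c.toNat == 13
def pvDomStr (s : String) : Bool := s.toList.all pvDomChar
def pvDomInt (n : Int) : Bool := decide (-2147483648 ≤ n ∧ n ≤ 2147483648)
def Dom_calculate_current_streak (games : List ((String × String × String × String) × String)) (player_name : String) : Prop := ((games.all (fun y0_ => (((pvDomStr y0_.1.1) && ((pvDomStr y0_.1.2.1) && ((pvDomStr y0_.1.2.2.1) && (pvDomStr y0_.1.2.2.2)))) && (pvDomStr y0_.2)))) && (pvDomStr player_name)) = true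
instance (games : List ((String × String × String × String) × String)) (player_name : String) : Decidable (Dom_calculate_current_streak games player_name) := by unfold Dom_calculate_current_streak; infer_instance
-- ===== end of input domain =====

-- B replaces A's stateful loop (accumulators + break) by a map to per-game results
-- followed by a first-index-of-change search; objective: idiomatic, same cost.

-- ===== PORT A =====
-- is_player_winner(game, player_name, game_type)
def is_player_winner (game : String × String × String × String) (player_name : String) (_game_type : String) : Bool :=
  player_name == game.2.2.1 || player_name == game.2.2.2

-- the for-loop of A: carries (current_type, streak_length); early break on a differing result
def streakLoopA (player_name : String) (current_type : Option String) (streak_length : Int) :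
    List ((String × String × String × String) × String) → Option String × Int
  | [] => (current_type, streak_length)
  | (game, game_type) :: rest =>
    let is_winner := is_player_winner game player_name game_type
    let result_type := if is_winner then "Win" else "Loss"
    match current_type with
    | none => streakLoopA player_name (some result_type) 1 rest
    | some c =>
      if c == result_type then streakLoopA player_name (some c) (streak_length + 1) rest
      else (some c, streak_length)

def calculate_current_streak (games : List ((String × String × String × String) × String)) (player_name : String) : String :=
  if games.isEmpty then "No games"
  else
    let res := streakLoopA player_name none 0 games
    let current_type := res.1
    let streak_length := res.2
    PySem.Int.toStr streak_length ++ " " ++ (current_type.getD "None") ++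
      (if streak_length != 1 then "s" else "")

-- ===== PORT B =====
-- the comprehension's per-game result ('Win' if player_name in game[2:4] else 'Loss')
def resOf (player_name : String) (gt : (String × String × String × String) × String) : String :=
  if player_name == gt.1.2.2.1 || player_name == gt.1.2.2.2 then "Win" else "Loss"

def calculate_current_streak_alt (games : List ((String × String × String × String) × String)) (player_name : String) : String :=
  match games with
  | [] => "No games"
  | _ =>
    let results := games.map (resOf player_name)
    let first := results.headD ""
    let streak_length : Int :=
      ((results.findIdx? (fun r => r != first)).map (fun i => (i : Int))).getD (results.length : Int)
    PySem.Int.toStr streak_length ++ " " ++ first ++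
      (if streak_length != 1 then "s" else "")

-- ===== PRECONDITION & SPEC =====
def Spec_calculate_current_streak (games : List ((String × String × String × String) × String)) (player_name : String) (out : String) : Prop := out = calculate_current_streak_alt games player_name
instance (games : List ((String × String × String × String) × String)) (player_name : String) (out : String) : Decidable (Spec_calculate_current_streak games player_name out) := by unfold Spec_calculate_current_streak; infer_instance

-- ===== CLAIM (what is proved, stated in full; the proofs are below) =====
def Claim_equal_calculate_current_streak : Prop := ∀ (games : List ((String × String × String × String) × String)) (player_name : String), Dom_calculate_current_streak games player_name → Spec_calculate_current_streak games player_name (calculate_current_streak games player_name)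

-- ===== LEMMAS AND PROOFS =====

-- A's loop, once started with current_type = some c, adds the length of the initial
-- run of c's among the remaining per-game results and never changes current_type.
lemma streakLoopA_some (player_name c : String) :
    ∀ (games : List ((String × String × String × String) × String)) (k : Int),
    streakLoopA player_name (some c) k games =
      (some c, k + ((games.map (resOf player_name)).takeWhile (fun r => r == c)).length) := by
  intro games
  induction games with
  | nil => intro k; simp [streakLoopA]
  | cons gt rest ih =>
    intro k
    by_cases h : c = (if player_name = gt.1.2.2.1 ∨ player_name = gt.1.2.2.2 then "Win" else "Loss")
    · subst h
      simp [streakLoopA, is_player_winner, resOf, ih (k + 1)]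
      try omega
    · simp [streakLoopA, is_player_winner, resOf, h, Ne.symm h]

-- B's first-index-of-change (with len fallback) equals the length of the initial run of f's.
lemma findIdx?_takeWhile (f : String) :
    ∀ (l : List String),
      (((l.findIdx? (fun r => r != f)).map (fun i => (i : Int))).getD (l.length : Int)) =
        ((l.takeWhile (fun r => r == f)).length : Int) := by
  intro l
  induction l with
  | nil => simp
  | cons a l ih =>
    by_cases h : a == f
    · have hne : (a != f) = false := by simp [bne, h]
      simp only [List.findIdx?_cons, hne, List.takeWhile, h]
      cases hfi : l.findIdx? (fun r => r != f) with
      | none => simp [hfi] at ih ⊢; omega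
      | some i => simp [hfi] at ih ⊢; omega
    · have hne : (a != f) = true := by simp [bne]; simpa using h
      have h' : (a == f) = false := by simpa using h
      simp [List.findIdx?_cons, hne, List.takeWhile, h']

-- ===== VERDICT (by name: the statement is the Claim_ definition above) =====
theorem calculate_current_streak_spec : Claim_equal_calculate_current_streak := by
  intro games player_name _
  show calculate_current_streak games player_name = calculate_current_streak_alt games player_name
  cases games with
  | nil => rfl
  | cons gt rest =>
    simp only [calculate_current_streak, calculate_current_streak_alt, List.isEmpty_cons,
      Bool.false_eq_true, reduceIte, streakLoopA, is_player_winner, resOf, List.map_cons,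
      List.headD_cons]
    simp only [streakLoopA_some, findIdx?_takeWhile]
    simp only [List.takeWhile_cons, beq_self_eq_true, if_true, List.length_cons, Option.getD_some]
    push_cast
    ring_nf
    try rfl
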